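-- pv_equiv track=rewrite | github.com/posl/comment_recommendation | script/split_gen/4_time/zh/136_B/4.py | count_odd_digits
-- ===== SOURCE A (Python) =====
-- def count_odd_digits(n):
--     count = 0
--     for i in range(1, n + 1):
--         if i < 10:
--             count += 1
--         elif i < 100:
--             count += 1
--         elif i < 1000:
--             count += 2
--         elif i < 10000:
--             count += 2
--         elif i < 100000:
--             count += 3
--     return count
-- ===== SOURCE B (Python) =====
-- def count_odd_digits(n):
--     # closed form: weight 1 on 1..99, 2 on 100..9999, 3 on 10000..99999, 0 beyond
--     return (max(0, min(n, 99))
--             + 2 * max(0, min(n, 9999) - 99)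
--             + 3 * max(0, min(n, 99999) - 9999))
-- ===== Notes on version B (the rewrite author's own statement) =====
-- stated objective: faster
-- what changed: Replaced the O(n) loop over range(1, n+1) that adds a per-magnitude weight for each i by a closed-form arithmetic expression summing each magnitude bucket's size times its weight.
import Mathlib
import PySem

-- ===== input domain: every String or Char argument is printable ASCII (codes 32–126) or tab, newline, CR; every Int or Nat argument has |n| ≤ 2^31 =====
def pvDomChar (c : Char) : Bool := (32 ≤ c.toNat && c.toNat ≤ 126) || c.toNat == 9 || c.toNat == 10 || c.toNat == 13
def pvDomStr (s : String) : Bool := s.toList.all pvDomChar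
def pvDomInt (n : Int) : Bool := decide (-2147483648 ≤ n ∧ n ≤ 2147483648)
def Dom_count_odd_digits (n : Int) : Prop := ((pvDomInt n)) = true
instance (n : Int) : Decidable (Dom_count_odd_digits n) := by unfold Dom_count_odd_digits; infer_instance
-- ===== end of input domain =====

-- B replaces A's loop over 1..n by a closed-form per-bucket arithmetic sum (objective: faster).

-- ===== PORT A =====
def count_odd_digits (n : Int) : Int :=
  (PySem.List.pyRange 1 (n + 1) 1).foldl
    (fun count i =>
      if i < 10 then count + 1
      else if i < 100 then count + 1
      else if i < 1000 then count + 2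
      else if i < 10000 then count + 2
      else if i < 100000 then count + 3
      else count) 0

-- ===== PORT B =====
def count_odd_digits_alt (n : Int) : Int :=
  max 0 (min n 99) + 2 * max 0 (min n 9999 - 99) + 3 * max 0 (min n 99999 - 9999)

-- ===== PRECONDITION & SPEC =====
def Spec_count_odd_digits (n : Int) (out : Int) : Prop := out = count_odd_digits_alt n
instance (n : Int) (out : Int) : Decidable (Spec_count_odd_digits n out) := by unfold Spec_count_odd_digits; infer_instance

-- ===== CLAIM (what is proved, stated in full; the proofs are below) =====
def Claim_equal_count_odd_digits : Prop := ∀ (n : Int), Dom_count_odd_digits n → Spec_count_odd_digits n (count_odd_digits n)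

-- ===== LEMMAS AND PROOFS =====

-- B's closed form, written region by region (used to keep min/max out of the omega goals)
theorem pv_alt_char (x : Int) (h0 : 0 ≤ x) :
    count_odd_digits_alt x =
      (if x ≤ 99 then x else if x ≤ 9999 then 2*x - 99
       else if x ≤ 99999 then 3*x - 10098 else 289899) := by
  unfold count_odd_digits_alt
  rcases le_or_gt x 99 with h1 | h1
  · rw [min_eq_left h1, max_eq_right h0,
       min_eq_left (by omega : x ≤ 9999), max_eq_left (by omega : x - 99 ≤ 0),
       min_eq_left (by omega : x ≤ 99999), max_eq_left (by omega : x - 9999 ≤ 0),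
       if_pos h1]
    ring
  · rcases le_or_gt x 9999 with h2 | h2
    · rw [min_eq_right (by omega : (99:Int) ≤ x), max_eq_right (by omega : (0:Int) ≤ 99),
         min_eq_left h2, max_eq_right (by omega : (0:Int) ≤ x - 99),
         min_eq_left (by omega : x ≤ 99999), max_eq_left (by omega : x - 9999 ≤ 0),
         if_neg (by omega), if_pos h2]
      ring
    · rcases le_or_gt x 99999 with h3 | h3
      · rw [min_eq_right (by omega : (99:Int) ≤ x), max_eq_right (by omega : (0:Int) ≤ 99),
           min_eq_right (by omega : (9999:Int) ≤ x), max_eq_right (by omega : (0:Int) ≤ 9999 - 99),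
           min_eq_left h3, max_eq_right (by omega : (0:Int) ≤ x - 9999),
           if_neg (by omega), if_neg (by omega), if_pos h3]
        ring
      · rw [min_eq_right (by omega : (99:Int) ≤ x), max_eq_right (by omega : (0:Int) ≤ 99),
           min_eq_right (by omega : (9999:Int) ≤ x), max_eq_right (by omega : (0:Int) ≤ 9999 - 99),
           min_eq_right (by omega : (99999:Int) ≤ x), max_eq_right (by omega : (0:Int) ≤ 99999 - 9999),
           if_neg (by omega), if_neg (by omega), if_neg (by omega)]
        ring

theorem pv_eq_nat (k : Nat) : count_odd_digits (k : Int) = count_odd_digits_alt (k : Int) := by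
  induction k with
  | zero =>
      simp [count_odd_digits, count_odd_digits_alt, PySem.List.pyRange_one_eq_nil]
  | succ m ih =>
      unfold count_odd_digits at ih ⊢
      have h : (((m + 1 : Nat) : Int) + 1) = ((m : Int) + 1) + 1 := by push_cast; ring
      rw [h, PySem.List.pyRange_one_succ_right (by omega), List.foldl_append, ih]
      have h2 : ((m : Int) + 1) = ((m + 1 : Nat) : Int) := by push_cast; ring
      simp only [List.foldl_cons, List.foldl_nil, h2]
      rw [pv_alt_char _ (by positivity), pv_alt_char _ (by positivity)]
      split_ifs <;> omega

theorem pv_eq (n : Int) : count_odd_digits n = count_odd_digits_alt n := by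
  rcases le_or_gt n 0 with h | h
  · have h1 : count_odd_digits n = 0 := by
      unfold count_odd_digits
      rw [PySem.List.pyRange_one_eq_nil (by omega)]
      rfl
    have h2 : count_odd_digits_alt n = 0 := by
      unfold count_odd_digits_alt
      rw [min_eq_left (by omega : n ≤ 99), max_eq_left (by omega : n ≤ 0),
         min_eq_left (by omega : n ≤ 9999), max_eq_left (by omega : n - 99 ≤ 0),
         min_eq_left (by omega : n ≤ 99999), max_eq_left (by omega : n - 9999 ≤ 0)]
      ring
    rw [h1, h2]
  · have hn : n = ((n.toNat : Nat) : Int) := by omega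
    rw [hn]; exact pv_eq_nat n.toNat

-- ===== VERDICT (by name: the statement is the Claim_ definition above) =====
theorem count_odd_digits_spec : Claim_equal_count_odd_digits := by
  intro n _
  exact pv_eq n
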